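-- pv_equiv track=rewrite | github.com/Rei-L0/PS_BOJ | 백준/Bronze/28062. 준석이의 사탕 사기/준석이의 사탕 사기.py | max_even_candy
-- ===== SOURCE A (Python) =====
-- def max_even_candy(N, candies):
--     total = sum(candies)
--
--     # 총합이 짝수일 경우
--     if total % 2 == 0:
--         return total
--
--     # 홀수일 경우, 가장 작은 홀수 사탕 묶음을 빼야 함
--     odd_candies = [candy for candy in candies if candy % 2 == 1]
--
--     if odd_candies:
--         return total - min(odd_candies)
--     else:
--         return 0
-- ===== SOURCE B (Python) =====
-- def max_even_candy(N, candies):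
--     ordered = sorted(candies)
--     total = sum(ordered)
--     if total % 2 == 0:
--         return total
--     for c in ordered:
--         if c % 2 != 0:
--             return total - c
--     return 0
-- ===== Notes on version B (the rewrite author's own statement) =====
-- stated objective: alternative
-- what changed: B sorts the list and, when the total is odd, linearly scans the sorted order for the FIRST odd element (which is the smallest odd) and subtracts it, replacing A's odd-filter comprehension plus min() call.
import Mathlib
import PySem

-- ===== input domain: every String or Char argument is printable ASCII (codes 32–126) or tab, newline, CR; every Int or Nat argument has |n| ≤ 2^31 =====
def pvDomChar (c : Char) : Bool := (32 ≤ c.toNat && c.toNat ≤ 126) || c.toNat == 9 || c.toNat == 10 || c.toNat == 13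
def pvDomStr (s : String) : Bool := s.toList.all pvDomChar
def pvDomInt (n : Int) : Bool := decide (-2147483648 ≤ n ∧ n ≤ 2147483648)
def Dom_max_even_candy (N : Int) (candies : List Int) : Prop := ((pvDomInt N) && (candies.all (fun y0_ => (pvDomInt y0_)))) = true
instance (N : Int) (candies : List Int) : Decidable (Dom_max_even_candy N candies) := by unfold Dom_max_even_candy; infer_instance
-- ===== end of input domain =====

-- B sorts the candies and, when the total is odd, scans the sorted order for the first odd
-- element (the smallest odd) and subtracts it, instead of A's odd-filter comprehension + min()
-- (objective: alternative algorithm, O(n log n) sort-then-scan vs A's filter+min).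


-- ===== PORT A =====
def max_even_candy (_N : Int) (candies : List Int) : Int :=
  let total := candies.sum
  if PySem.Int.mod total 2 == 0 then total
  else
    let odd_candies := candies.filter (fun candy => PySem.Int.mod candy 2 == 1)
    if !odd_candies.isEmpty then total - (PySem.List.min? odd_candies (fun x => x)).getD 0
    else 0

-- ===== PORT B =====
-- the 'for c in ordered: if c % 2 != 0: return total - c' scan; fallthrough returns 0
def pvScanOdd (total : Int) (l : List Int) : Int :=
  match l with
  | [] => 0
  | c :: t => if PySem.Int.mod c 2 != 0 then total - c else pvScanOdd total t

def max_even_candy_alt (_N : Int) (candies : List Int) : Int :=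
  let ordered := PySem.List.sorted candies (fun x => x) false
  let total := ordered.sum
  if PySem.Int.mod total 2 == 0 then total
  else pvScanOdd total ordered

-- ===== PRECONDITION & SPEC =====
def Spec_max_even_candy (N : Int) (candies : List Int) (out : Int) : Prop := out = max_even_candy_alt N candies
instance (N : Int) (candies : List Int) (out : Int) : Decidable (Spec_max_even_candy N candies out) := by unfold Spec_max_even_candy; infer_instance

-- ===== CLAIM (what is proved, stated in full; the proofs are below) =====
def Claim_equal_max_even_candy : Prop := ∀ (N : Int) (candies : List Int), Dom_max_even_candy N candies → Spec_max_even_candy N candies (max_even_candy N candies)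

-- ===== LEMMAS AND PROOFS =====

lemma pvmod2 (x : Int) : PySem.Int.mod x 2 = x % 2 :=
  PySem.Int.mod_eq_emod_of_pos (by norm_num)

lemma pvOddPred (c : Int) : (PySem.Int.mod c 2 != 0) = (PySem.Int.mod c 2 == 1) := by
  rw [pvmod2]
  rcases Int.emod_two_eq c with h | h <;> rw [h] <;> decide

-- the scan returns total - (first odd element), 0 if there is none
lemma pvScanOdd_eq (T : Int) (l : List Int) :
    pvScanOdd T l =
      match l.filter (fun c => PySem.Int.mod c 2 == 1) with
      | [] => 0
      | x :: _ => T - x := by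
  induction l with
  | nil => rfl
  | cons c t ih =>
    rw [pvScanOdd, List.filter_cons, pvOddPred]
    by_cases hc : (PySem.Int.mod c 2 == 1) = true
    · rw [if_pos hc, if_pos hc]
    · rw [if_neg hc, if_neg hc, ih]

lemma pvAllEven_sum (l : List Int) (h : l.filter (fun c => PySem.Int.mod c 2 == 1) = []) :
    l.sum % 2 = 0 := by
  induction l with
  | nil => simp
  | cons c t ih =>
    rw [List.filter_cons] at h
    by_cases hc : (PySem.Int.mod c 2 == 1) = true
    · rw [if_pos hc] at h; exact absurd h (by simp)
    · rw [if_neg hc] at h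
      have hc' : c % 2 = 0 := by
        rw [pvmod2] at hc
        rcases Int.emod_two_eq c with h2 | h2
        · exact h2
        · exact absurd (by simp [h2]) hc
      rw [List.sum_cons]
      have := ih h
      omega

-- head of the odd-filter of the sorted list = min of the odd-filter of the original
lemma pvHead_eq_min (candies : List Int) (x : Int) (t : List Int)
    (hx : (PySem.List.sorted candies (fun y => y) false).filter
            (fun c => PySem.Int.mod c 2 == 1) = x :: t) :
    PySem.List.min? (candies.filter (fun c => PySem.Int.mod c 2 == 1)) (fun y => y) = some x := by
  have hperm : ((PySem.List.sorted candies (fun y => y) false).filter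
      (fun c => PySem.Int.mod c 2 == 1)).Perm
      (candies.filter (fun c => PySem.Int.mod c 2 == 1)) :=
    (PySem.List.sorted_perm candies (fun y => y) false).filter _
  have hpw : ((PySem.List.sorted candies (fun y => y) false).filter
      (fun c => PySem.Int.mod c 2 == 1)).Pairwise (· ≤ ·) :=
    (PySem.List.sorted_pairwise candies (fun y => y)).filter _
  rw [hx] at hperm hpw
  -- candies.filter odd is nonempty, so min? = some m
  have hne : candies.filter (fun c => PySem.Int.mod c 2 == 1) ≠ [] := by
    intro h0; rw [h0] at hperm; exact absurd hperm.eq_nil (by simp)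
  obtain ⟨m, hm⟩ : ∃ m, PySem.List.min? (candies.filter (fun c => PySem.Int.mod c 2 == 1))
      (fun y => y) = some m := by
    cases hmin : PySem.List.min? (candies.filter (fun c => PySem.Int.mod c 2 == 1))
        (fun y => y) with
    | none =>
      exact absurd ((PySem.List.min?_eq_none_iff (candies.filter
        (fun c => PySem.Int.mod c 2 == 1)) (fun y => y)).mp hmin) hne
    | some m => exact ⟨m, rfl⟩
  rw [hm]
  have hmmem : m ∈ candies.filter (fun c => PySem.Int.mod c 2 == 1) :=
    PySem.List.min?_mem hm
  have hxmem : x ∈ candies.filter (fun c => PySem.Int.mod c 2 == 1) :=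
    hperm.mem_iff.mp (List.mem_cons_self)
  -- m ≤ x by minimality, x ≤ m since x is the head of a ≤-sorted permutation
  have h1 : m ≤ x := PySem.List.min?_isMin hm x hxmem
  have h2 : x ≤ m := by
    have hmem' : m ∈ x :: t := hperm.mem_iff.mpr hmmem
    rcases List.mem_cons.mp hmem' with h | h
    · omega
    · exact (List.pairwise_cons.mp hpw).1 m h
  rw [le_antisymm h1 h2]

-- ===== VERDICT (by name: the statement is the Claim_ definition above) =====
theorem max_even_candy_spec : Claim_equal_max_even_candy := by
  intro N candies _
  unfold Spec_max_even_candy max_even_candy max_even_candy_alt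
  have hsum : (PySem.List.sorted candies (fun y => y) false).sum = candies.sum :=
    (PySem.List.sorted_perm candies (fun y => y) false).sum_eq
  simp only [hsum]
  by_cases hev : (PySem.Int.mod candies.sum 2 == 0) = true
  · rw [if_pos hev, if_pos hev]
  · rw [if_neg hev, if_neg hev, pvScanOdd_eq]
    cases hx : (PySem.List.sorted candies (fun y => y) false).filter
        (fun c => PySem.Int.mod c 2 == 1) with
    | nil =>
      -- impossible: all candies even would make the total even
      exfalso
      apply hev
      have hperm : ((PySem.List.sorted candies (fun y => y) false).filter
          (fun c => PySem.Int.mod c 2 == 1)).Perm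
          (candies.filter (fun c => PySem.Int.mod c 2 == 1)) :=
        (PySem.List.sorted_perm candies (fun y => y) false).filter _
      rw [hx] at hperm
      have h0 : candies.filter (fun c => PySem.Int.mod c 2 == 1) = [] := hperm.symm.eq_nil
      have := pvAllEven_sum candies h0
      simp [this]
    | cons x t =>
      have hmin := pvHead_eq_min candies x t hx
      have hne : candies.filter (fun c => PySem.Int.mod c 2 == 1) ≠ [] := by
        intro h0
        rw [h0] at hmin
        simp [PySem.List.min?] at hmin
      rw [if_pos (by simpa using hne), hmin, Option.getD_some]
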